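-- pv_equiv track=rewrite | github.com/duartebarbosadev/PhotoSort | src/ui/helpers/navigation_utils.py | navigate_linear
-- ===== SOURCE A (Python) =====
-- from typing import Callable, Optional, Sequence, Iterable, Set
--
-- def navigate_linear(
--     ordered_paths: Sequence[str],
--     current_path: Optional[str],
--     direction: str,
--     skip_deleted: bool,
--     deleted_paths: Set[str] | Iterable[str],
-- ) -> Optional[str]:
--     """Return next path in a flat ordering (up/down semantics).
--
--     direction: 'up' or 'down'
--     Behavior matches legacy:
--       - If no current_path: 'down' => first, 'up' => last
--       - No wrap-around
--       - If skip_deleted, deleted items are skipped.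
--     """
--     if not ordered_paths:
--         return None
--     deleted_set = set(deleted_paths)
--
--     def is_ok(p: str) -> bool:
--         return (p not in deleted_set) if skip_deleted else True
--
--     # Establish starting index
--     if current_path in ordered_paths:
--         start_idx = ordered_paths.index(current_path)
--     else:
--         start_idx = -1  # Force selection rule below
--
--     if direction == "down":
--         if start_idx == -1:  # No current selection
--             # pick first acceptable
--             for p in ordered_paths:
--                 if is_ok(p):
--                     return p
--             return None
--         # iterate forward
--         for i in range(start_idx + 1, len(ordered_paths)):
--             p = ordered_paths[i]
--             if is_ok(p):
--                 return p
--         return None  # No further candidate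
--     elif direction == "up":
--         if start_idx == -1:
--             # pick last acceptable
--             for p in reversed(ordered_paths):
--                 if is_ok(p):
--                     return p
--             return None
--         for i in range(start_idx - 1, -1, -1):
--             p = ordered_paths[i]
--             if is_ok(p):
--                 return p
--         return None
--     else:
--         return current_path
-- ===== SOURCE B (Python) =====
-- from typing import Optional, Sequence, Iterable, Set
--
--
-- def navigate_linear(
--     ordered_paths: Sequence[str],
--     current_path: Optional[str],
--     direction: str,
--     skip_deleted: bool,
--     deleted_paths: Set[str] | Iterable[str],
-- ) -> Optional[str]:
--     """Index-list decomposition: one pass builds the surviving (index, path)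
--     pairs; the answer is then a single scan over that list relative to the
--     current index (sentinel -1 for 'down', len for 'up' when absent)."""
--     if not ordered_paths:
--         return None
--     if direction != "down" and direction != "up":
--         return current_path
--     deleted = set(deleted_paths)
--     ok = [(i, p) for i, p in enumerate(ordered_paths)
--           if not skip_deleted or p not in deleted]
--     try:
--         cur = ordered_paths.index(current_path)
--     except ValueError:
--         cur = -1 if direction == "down" else len(ordered_paths)
--     if direction == "down":
--         for i, p in ok:
--             if cur < i:
--                 return p
--         return None
--     else:
--         for i, p in reversed(ok):
--             if i < cur:
--                 return p
--         return None
-- ===== Notes on version B (the rewrite author's own statement) =====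
-- stated objective: alternative
-- what changed: B builds the surviving (index, path) pairs once in a single filtered-enumerate pass and then answers with one scan of that index list relative to the current index (sentinel -1 for 'down', len for 'up'), instead of A's per-branch range loops and separate no-selection loops.
import Mathlib
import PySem

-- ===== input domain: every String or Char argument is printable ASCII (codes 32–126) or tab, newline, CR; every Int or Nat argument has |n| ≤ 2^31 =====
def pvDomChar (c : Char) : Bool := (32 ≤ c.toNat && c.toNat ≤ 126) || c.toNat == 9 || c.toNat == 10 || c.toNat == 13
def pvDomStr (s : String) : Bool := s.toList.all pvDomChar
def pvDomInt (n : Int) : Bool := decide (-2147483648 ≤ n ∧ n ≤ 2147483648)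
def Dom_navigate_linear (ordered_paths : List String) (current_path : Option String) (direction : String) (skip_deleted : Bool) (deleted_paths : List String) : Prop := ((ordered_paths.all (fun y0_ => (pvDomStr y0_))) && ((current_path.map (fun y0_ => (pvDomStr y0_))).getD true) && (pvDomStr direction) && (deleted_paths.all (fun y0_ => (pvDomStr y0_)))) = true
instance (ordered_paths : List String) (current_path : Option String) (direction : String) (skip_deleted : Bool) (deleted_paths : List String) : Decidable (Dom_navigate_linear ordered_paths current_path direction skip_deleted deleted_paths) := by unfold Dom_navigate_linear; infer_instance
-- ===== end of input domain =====

-- ===== PORT A =====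
-- B: one filtered-enumerate pass builds the surviving (index, path) pairs, then one scan
-- of that index list answers both directions; A loops per branch over index ranges.
-- Same O(n) cost ('alternative'); proved equal on all of Dom.

-- 'for p in ordered_paths: if is_ok(p): return p' (and its reversed twin), transcribed
def pvAFirstOk (ok : String → Bool) : List String → Option String
  | [] => none
  | p :: rest => if ok p then some p else pvAFirstOk ok rest

-- 'for i in range(...): p = ordered_paths[i]; if is_ok(p): return p', transcribed
-- (pyGet? is always 'some' on the ranges A uses; the 'none' arm is unreachable)
def pvAScan (xs : List String) (ok : String → Bool) : List Int → Option String
  | [] => none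
  | i :: rest =>
    match PySem.List.pyGet? xs i with
    | some p => if ok p then some p else pvAScan xs ok rest
    | none => pvAScan xs ok rest

def navigate_linear (ordered_paths : List String) (current_path : Option String) (direction : String) (skip_deleted : Bool) (deleted_paths : List String) : Option String :=
  if ordered_paths = [] then none
  else
    let deleted_set := PySem.Set.ofList deleted_paths
    let is_ok : String → Bool := fun p => if skip_deleted then !(PySem.Set.contains deleted_set p) else true
    -- 'current_path in ordered_paths' then '.index(current_path)': the membership test
    -- + first-occurrence index pair is exactly index?; None is never in a list of str
    let start_idx : Int :=
      match current_path with
      | none => -1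
      | some c =>
        match PySem.List.index? ordered_paths c with
        | some k => (k : Int)
        | none => -1
    if direction = "down" then
      if start_idx = -1 then pvAFirstOk is_ok ordered_paths
      else pvAScan ordered_paths is_ok (PySem.List.pyRange (start_idx + 1) (ordered_paths.length : Int) 1)
    else if direction = "up" then
      if start_idx = -1 then pvAFirstOk is_ok ordered_paths.reverse
      else pvAScan ordered_paths is_ok (PySem.List.pyRange (start_idx - 1) (-1) (-1))
    else current_path

-- ===== PORT B =====
-- 'for i, p in ok: if cur < i: return p', transcribed
def pvBDown : List (Int × String) → Int → Option String
  | [], _ => none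
  | (i, p) :: rest, cur => if cur < i then some p else pvBDown rest cur

-- 'for i, p in reversed(ok): if i < cur: return p', transcribed
def pvBUp : List (Int × String) → Int → Option String
  | [], _ => none
  | (i, p) :: rest, cur => if i < cur then some p else pvBUp rest cur

def navigate_linear_alt (ordered_paths : List String) (current_path : Option String) (direction : String) (skip_deleted : Bool) (deleted_paths : List String) : Option String :=
  if ordered_paths = [] then none
  else if direction ≠ "down" ∧ direction ≠ "up" then current_path
  else
    let deleted := PySem.Set.ofList deleted_paths
    let okf : String → Bool := fun p => !skip_deleted || !(PySem.Set.contains deleted p)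
    let ok := (PySem.List.enumerate ordered_paths).filter (fun ip => okf ip.2)
    -- 'try: index(current_path) except ValueError: sentinel' — index? is that try/except
    let cur : Int :=
      match current_path with
      | none => if direction = "down" then -1 else (ordered_paths.length : Int)
      | some c =>
        match PySem.List.index? ordered_paths c with
        | some k => (k : Int)
        | none => if direction = "down" then -1 else (ordered_paths.length : Int)
    if direction = "down" then pvBDown ok cur
    else pvBUp ok.reverse cur

-- ===== PRECONDITION & SPEC =====
def Spec_navigate_linear (ordered_paths : List String) (current_path : Option String) (direction : String) (skip_deleted : Bool) (deleted_paths : List String) (out : Option String) : Prop := out = navigate_linear_alt ordered_paths current_path direction skip_deleted deleted_paths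
instance (ordered_paths : List String) (current_path : Option String) (direction : String) (skip_deleted : Bool) (deleted_paths : List String) (out : Option String) : Decidable (Spec_navigate_linear ordered_paths current_path direction skip_deleted deleted_paths out) := by unfold Spec_navigate_linear; infer_instance

-- ===== CLAIM (what is proved, stated in full; the proofs are below) =====
def Claim_equal_navigate_linear : Prop := ∀ (ordered_paths : List String) (current_path : Option String) (direction : String) (skip_deleted : Bool) (deleted_paths : List String), Dom_navigate_linear ordered_paths current_path direction skip_deleted deleted_paths → Spec_navigate_linear ordered_paths current_path direction skip_deleted deleted_paths (navigate_linear ordered_paths current_path direction skip_deleted deleted_paths)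

-- ===== LEMMAS AND PROOFS =====

-- A's first-acceptable loop is find?
theorem pvAFirstOk_eq_find? (ok : String → Bool) (l : List String) :
    pvAFirstOk ok l = l.find? ok := by
  induction l with
  | nil => rfl
  | cons p rest ih => simp only [pvAFirstOk, List.find?, ih]; cases ok p <;> simp

-- indexing within bounds always yields some
theorem pvPyGet_nonneg (xs : List String) (a : Int) (ha : 0 ≤ a) (h : a.toNat < xs.length) :
    PySem.List.pyGet? xs a = some xs[a.toNat] := by
  obtain ⟨n, rfl⟩ := Int.eq_ofNat_of_zero_le ha
  simp only [Int.toNat_natCast] at h ⊢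
  simp [PySem.List.pyGet?, PySem.List.pyIdx?, h]

-- A's forward index loop over range(a, len) is find? on the dropped suffix
theorem pvAScan_down (ok : String → Bool) (xs : List String) :
    ∀ (n : Nat) (a : Int), 0 ≤ a → xs.length - a.toNat ≤ n →
      pvAScan xs ok (PySem.List.pyRange a (xs.length : Int) 1) = (xs.drop a.toNat).find? ok := by
  intro n
  induction n with
  | zero =>
    intro a ha hn
    rw [PySem.List.pyRange_one_eq_nil (by omega)]
    have : xs.drop a.toNat = [] := List.drop_eq_nil_of_le (by omega)
    simp [pvAScan, this]
  | succ n ih =>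
    intro a ha hn
    by_cases hlt : a < (xs.length : Int)
    · have hk : a.toNat < xs.length := by omega
      rw [PySem.List.pyRange_one_cons hlt]
      rw [show xs.drop a.toNat = xs[a.toNat] :: xs.drop (a.toNat + 1) from
        (List.getElem_cons_drop hk).symm]
      simp only [pvAScan, pvPyGet_nonneg xs a ha hk, List.find?]
      cases hok : ok xs[a.toNat] with
      | true => simp
      | false =>
        rw [if_neg (by simp)]
        have := ih (a + 1) (by omega) (by omega)
        rwa [show (a + 1).toNat = a.toNat + 1 by omega] at this
    · rw [PySem.List.pyRange_one_eq_nil (by omega)]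
      have : xs.drop a.toNat = [] := List.drop_eq_nil_of_le (by omega)
      simp [pvAScan, this]

-- A's backward index loop over range(c-1, -1, -1) is find? on the reversed prefix
theorem pvAScan_up (ok : String → Bool) (xs : List String) :
    ∀ (c : Nat), c ≤ xs.length →
      pvAScan xs ok (PySem.List.pyRange ((c : Int) - 1) (-1) (-1)) = ((xs.take c).reverse).find? ok := by
  intro c
  induction c with
  | zero =>
    intro _
    rw [PySem.List.pyRange_neg_one_eq_nil (by omega)]
    simp [pvAScan]
  | succ c ih =>
    intro hc
    have hk : c < xs.length := by omega
    rw [show (((c : Nat) + 1 : Nat) : Int) - 1 = (c : Int) by push_cast; ring,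
        PySem.List.pyRange_neg_one_cons (by omega)]
    rw [List.take_succ_eq_append_getElem hk]
    simp only [pvAScan, pvPyGet_nonneg xs (c : Int) (by omega) (by simpa using hk),
      List.reverse_append, List.reverse_cons, List.reverse_nil,
      List.nil_append, List.cons_append, List.find?]
    cases hok : ok xs[c] with
    | true => simp [hok]
    | false =>
      rw [if_neg (by simp [hok])]
      exact ih (by omega)

-- B's forward scan of the filtered index list is find? on the dropped suffix
theorem pvBDown_filter (ok : String → Bool) (xs : List String) :
    ∀ (n cur : Int),
      pvBDown (((PySem.List.enumerate xs n).filter (fun ip => ok ip.2))) cur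
        = (xs.drop (cur + 1 - n).toNat).find? ok := by
  induction xs with
  | nil => intro n cur; simp [PySem.List.enumerate, pvBDown]
  | cons x rest ih =>
    intro n cur
    rw [PySem.List.enumerate_cons]
    by_cases hcur : cur < n
    · have h0 : (cur + 1 - n).toNat = 0 := by omega
      have h0' : (cur + 1 - (n + 1)).toNat = 0 := by omega
      rw [h0]
      cases hok : ok x with
      | true => simp [hok, pvBDown, hcur]
      | false =>
        simp only [List.filter_cons]
        rw [if_neg (by simp [hok]), ih (n + 1) cur, h0']
        simp [hok]
    · have h1 : (cur + 1 - n).toNat = (cur + 1 - (n + 1)).toNat + 1 := by omega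
      rw [h1]
      simp only [List.drop_succ_cons, List.filter_cons]
      cases hok : ok x with
      | true =>
        rw [if_pos (by simp)]
        simp [pvBDown, hcur, ih (n + 1) cur]
      | false =>
        rw [if_neg (by simp)]
        exact ih (n + 1) cur

-- scanning an appended list: the first part wins
theorem pvBUp_append (l1 l2 : List (Int × String)) (cur : Int) :
    pvBUp (l1 ++ l2) cur = (pvBUp l1 cur).or (pvBUp l2 cur) := by
  induction l1 with
  | nil => simp [pvBUp]
  | cons ip rest ih =>
    obtain ⟨i, p⟩ := ip
    by_cases h : i < cur <;> simp [pvBUp, h, ih]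

-- B's backward scan of the reversed filtered index list is find? on the reversed prefix
theorem pvBUp_filter (ok : String → Bool) (xs : List String) :
    ∀ (n cur : Int),
      pvBUp (((PySem.List.enumerate xs n).filter (fun ip => ok ip.2)).reverse) cur
        = ((xs.take (cur - n).toNat).reverse).find? ok := by
  induction xs with
  | nil => intro n cur; simp [PySem.List.enumerate, pvBUp]
  | cons x rest ih =>
    intro n cur
    rw [PySem.List.enumerate_cons]
    by_cases hcur : n < cur
    · have h1 : (cur - n).toNat = (cur - (n + 1)).toNat + 1 := by omega
      rw [h1, List.take_succ_cons]
      cases hok : ok x with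
      | true =>
        simp only [List.filter_cons]
        rw [if_pos (by simp [hok]), List.reverse_cons, pvBUp_append, ih (n + 1) cur,
          List.reverse_cons, List.find?_append]
        simp [pvBUp, hcur, List.find?, hok]
      | false =>
        simp only [List.filter_cons]
        rw [if_neg (by simp [hok]), ih (n + 1) cur, List.reverse_cons, List.find?_append]
        simp [List.find?, hok]
    · have h0 : (cur - n).toNat = 0 := by omega
      have h0' : (cur - (n + 1)).toNat = 0 := by omega
      rw [h0]
      cases hok : ok x with
      | true =>
        simp only [List.filter_cons]
        rw [if_pos (by simp [hok]), List.reverse_cons, pvBUp_append, ih (n + 1) cur, h0']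
        simp [pvBUp, hcur]
      | false =>
        simp only [List.filter_cons]
        rw [if_neg (by simp [hok]), ih (n + 1) cur, h0']
        simp

-- ===== VERDICT (by name: the statement is the Claim_ definition above) =====
theorem navigate_linear_spec : Claim_equal_navigate_linear := by
  intro xs cp direction skip deleted _
  unfold Spec_navigate_linear navigate_linear navigate_linear_alt
  by_cases hnil : xs = []
  · simp [hnil]
  · simp only [if_neg hnil]
    have hok : (fun p => if skip then !(PySem.Set.contains (PySem.Set.ofList deleted) p) else true)
        = (fun p => !skip || !(PySem.Set.contains (PySem.Set.ofList deleted) p)) := by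
      funext p; cases skip <;> simp
    set okB : String → Bool := fun p => !skip || !(PySem.Set.contains (PySem.Set.ofList deleted) p) with hokB
    by_cases hdown : direction = "down"
    · subst hdown
      rw [if_neg (show ¬("down" ≠ "down" ∧ "down" ≠ "up") by simp), if_pos rfl, if_pos rfl]
      cases cp with
      | none =>
        rw [if_pos rfl, if_pos rfl, pvAFirstOk_eq_find?, hok]
        exact (pvBDown_filter okB xs 0 (-1)).symm
      | some c =>
        cases hidx : PySem.List.index? xs c with
        | none =>
          simp only [hidx]
          rw [if_pos trivial, if_pos trivial, pvAFirstOk_eq_find?, hok]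
          exact (pvBDown_filter okB xs 0 (-1)).symm
        | some k =>
          simp only [hidx]
          rw [pvAScan_down _ xs xs.length ((k : Int) + 1) (by omega) (by omega), hok]
          refine Eq.trans ?_ (pvBDown_filter okB xs 0 (k : Int)).symm
          congr 1
    · by_cases hup : direction = "up"
      · subst hup
        rw [if_neg (show ¬("up" ≠ "down" ∧ "up" ≠ "up") by simp),
          if_neg (show ¬("up" = "down") by simp), if_pos rfl,
          if_neg (show ¬("up" = "down") by simp)]
        cases cp with
        | none =>
          rw [if_pos rfl, if_neg (show ¬("up" = "down") by simp), pvAFirstOk_eq_find?, hok]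
          refine Eq.trans ?_ (pvBUp_filter okB xs 0 (xs.length : Int)).symm
          simp
        | some c =>
          cases hidx : PySem.List.index? xs c with
          | none =>
            simp only [hidx]
            rw [if_pos trivial, if_neg (show ¬("up" = "down") by simp), pvAFirstOk_eq_find?, hok]
            refine Eq.trans ?_ (pvBUp_filter okB xs 0 (xs.length : Int)).symm
            simp
          | some k =>
            simp only [hidx]
            rw [pvAScan_up _ xs k (le_of_lt (PySem.List.getElem_of_index?_eq_some hidx).fst), hok]
            refine Eq.trans ?_ (pvBUp_filter okB xs 0 (k : Int)).symm
            congr 2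
      · rw [if_neg hdown, if_neg hup, if_pos (show direction ≠ "down" ∧ direction ≠ "up" from ⟨hdown, hup⟩)]
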